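-- pv_equiv track=rewrite | github.com/youlive789/AlgorithmStudy | BackJoon/implementation/2966.py | calc_g
-- ===== SOURCE A (Python) =====
-- def calc_g(answer):
--     score = 0
--     target = list(answer)
--     for idx, char in enumerate(target):
--         idx_mod = idx % 6
--         if (idx_mod == 0 or idx_mod == 1) and char == "C":
--             score += 1
--         elif (idx_mod == 2 or idx_mod == 3) and char == "A":
--             score += 1
--         elif (idx_mod == 4 or idx_mod == 5) and char == "B":
--             score += 1
--     return score
-- ===== SOURCE B (Python) =====
-- def calc_g(answer):
--     target = list(answer)
--     score = 0
--     start = 0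
--     n = len(target)
--     while start < n:
--         score += sum(c == p for p, c in zip("CCAABB", target[start:start + 6]))
--         start += 6
--     return score
-- ===== Notes on version B (the rewrite author's own statement) =====
-- stated objective: alternative
-- what changed: Replaces the single index-enumerating loop that branches on idx % 6 with a strided while-loop that slices the list six characters at a time and zips each slice against the fixed six-character pattern, so no index modulus is ever computed.
import Mathlib
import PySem

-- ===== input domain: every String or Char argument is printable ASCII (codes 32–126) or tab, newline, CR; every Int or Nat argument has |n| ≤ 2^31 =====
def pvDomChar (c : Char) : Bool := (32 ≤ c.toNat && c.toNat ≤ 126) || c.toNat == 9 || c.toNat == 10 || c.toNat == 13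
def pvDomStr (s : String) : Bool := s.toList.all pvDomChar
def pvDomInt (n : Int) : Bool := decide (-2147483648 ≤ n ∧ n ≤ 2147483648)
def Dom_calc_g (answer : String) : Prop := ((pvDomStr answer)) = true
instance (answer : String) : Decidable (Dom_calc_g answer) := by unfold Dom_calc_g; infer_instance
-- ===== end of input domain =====

-- B replaces the idx % 6 branching loop by a strided loop zipping six-char slices against the fixed pattern; same O(n) cost, different decomposition.

-- ===== PORT A =====
-- the body of A's for-loop, named (idx_mod = idx % 6; the elif chain in source order)
def calcGStepA (score : Int) (ic : Int × Char) : Int :=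
  let idx_mod := PySem.Int.mod ic.1 6
  if (idx_mod == 0 || idx_mod == 1) && ic.2 == 'C' then score + 1
  else if (idx_mod == 2 || idx_mod == 3) && ic.2 == 'A' then score + 1
  else if (idx_mod == 4 || idx_mod == 5) && ic.2 == 'B' then score + 1
  else score

def calc_g (answer : String) : Int :=
  let target := answer.toList
  (PySem.List.enumerate target 0).foldl calcGStepA 0

-- ===== PORT B =====
-- the while loop: while start < n: score += matches of target[start:start+6] against "CCAABB"; start += 6
def calcGWhile (target : List Char) (n : Int) (start : Int) (score : Int) : Int :=
  if h : start < n then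
    calcGWhile target n (start + 6)
      (score + ((("CCAABB".toList).zip
          (PySem.List.slice target (some start) (some (start + 6)))).countP
        (fun pc => pc.2 == pc.1) : Int))
  else score
  termination_by (n - start).toNat
  decreasing_by omega

def calc_g_alt (answer : String) : Int :=
  let target := answer.toList
  calcGWhile target (PySem.List.len target) 0 0

-- ===== PRECONDITION & SPEC =====
def Spec_calc_g (answer : String) (out : Int) : Prop := out = calc_g_alt answer
instance (answer : String) (out : Int) : Decidable (Spec_calc_g answer out) := by unfold Spec_calc_g; infer_instance

-- ===== CLAIM (what is proved, stated in full; the proofs are below) =====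
def Claim_equal_calc_g : Prop := ∀ (answer : String), Dom_calc_g answer → Spec_calc_g answer (calc_g answer)

-- ===== LEMMAS AND PROOFS =====

-- spec-level chunked sum both ports are reduced to: six characters at a time against "CCAABB"
def calcGChunks : List Char → Int
  | [] => 0
  | a :: ts =>
      ((("CCAABB".toList).zip ((a :: ts).take 6)).countP (fun pc => pc.2 == pc.1) : Int)
        + calcGChunks ((a :: ts).drop 6)
  termination_by t => t.length
  decreasing_by simp

lemma calcGStepA_C (s : Int) (i : Int) (c : Char) (h : i % 6 = 0 ∨ i % 6 = 1) :
    calcGStepA s (i, c) = if c == 'C' then s + 1 else s := by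
  have hm := PySem.Int.mod_eq_emod_of_pos (a := i) (b := 6) (by norm_num)
  rcases h with h | h <;> simp [calcGStepA, hm, h, Int.dvd_iff_emod_eq_zero]

lemma calcGStepA_A (s : Int) (i : Int) (c : Char) (h : i % 6 = 2 ∨ i % 6 = 3) :
    calcGStepA s (i, c) = if c == 'A' then s + 1 else s := by
  have hm := PySem.Int.mod_eq_emod_of_pos (a := i) (b := 6) (by norm_num)
  rcases h with h | h <;> simp [calcGStepA, hm, h, Int.dvd_iff_emod_eq_zero]

lemma calcGStepA_B (s : Int) (i : Int) (c : Char) (h : i % 6 = 4 ∨ i % 6 = 5) :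
    calcGStepA s (i, c) = if c == 'B' then s + 1 else s := by
  have hm := PySem.Int.mod_eq_emod_of_pos (a := i) (b := 6) (by norm_num)
  rcases h with h | h <;> simp [calcGStepA, hm, h, Int.dvd_iff_emod_eq_zero]

-- A's fold over enumerate equals the chunked sum
set_option maxHeartbeats 1000000 in
lemma calcG_key : ∀ (n : Nat) (t : List Char), t.length ≤ n → ∀ (k : Nat) (s : Int),
    (PySem.List.enumerate t (6 * (k : Int))).foldl calcGStepA s = s + calcGChunks t := by
  intro n
  induction n with
  | zero =>
      intro t ht k s
      interval_cases h : t.length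
      · rw [List.length_eq_zero_iff] at h; subst h
        simp [PySem.List.enumerate_nil, calcGChunks]
  | succ n ih =>
      intro t ht k s
      have hm0 : (6 * (k : Int)) % 6 = 0 := by omega
      have hm1 : (6 * (k : Int) + 1) % 6 = 1 := by omega
      have hm2 : (6 * (k : Int) + 1 + 1) % 6 = 2 := by omega
      have hm3 : (6 * (k : Int) + 1 + 1 + 1) % 6 = 3 := by omega
      have hm4 : (6 * (k : Int) + 1 + 1 + 1 + 1) % 6 = 4 := by omega
      have hm5 : (6 * (k : Int) + 1 + 1 + 1 + 1 + 1) % 6 = 5 := by omega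
      rcases t with _ | ⟨a, _ | ⟨b, _ | ⟨c, _ | ⟨d, _ | ⟨e, _ | ⟨f, rest⟩⟩⟩⟩⟩⟩
      · simp [PySem.List.enumerate_nil, calcGChunks]
      · rw [calcGChunks.eq_2]
        simp only [PySem.List.enumerate_cons, PySem.List.enumerate_nil, List.foldl_cons,
          List.foldl_nil]
        rw [calcGStepA_C _ _ _ (Or.inl hm0)]
        simp [List.countP_cons, calcGChunks]
        split_ifs <;> simp_all <;> omega
      · rw [calcGChunks.eq_2]
        simp only [PySem.List.enumerate_cons, PySem.List.enumerate_nil, List.foldl_cons,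
          List.foldl_nil]
        rw [calcGStepA_C _ _ _ (Or.inl hm0), calcGStepA_C _ _ _ (Or.inr hm1)]
        simp [List.countP_cons, calcGChunks]
        split_ifs <;> simp_all <;> omega
      · rw [calcGChunks.eq_2]
        simp only [PySem.List.enumerate_cons, PySem.List.enumerate_nil, List.foldl_cons,
          List.foldl_nil]
        rw [calcGStepA_C _ _ _ (Or.inl hm0), calcGStepA_C _ _ _ (Or.inr hm1),
          calcGStepA_A _ _ _ (Or.inl hm2)]
        simp [List.countP_cons, calcGChunks]
        split_ifs <;> simp_all <;> omega
      · rw [calcGChunks.eq_2]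
        simp only [PySem.List.enumerate_cons, PySem.List.enumerate_nil, List.foldl_cons,
          List.foldl_nil]
        rw [calcGStepA_C _ _ _ (Or.inl hm0), calcGStepA_C _ _ _ (Or.inr hm1),
          calcGStepA_A _ _ _ (Or.inl hm2), calcGStepA_A _ _ _ (Or.inr hm3)]
        simp [List.countP_cons, calcGChunks]
        split_ifs <;> simp_all <;> omega
      · rw [calcGChunks.eq_2]
        simp only [PySem.List.enumerate_cons, PySem.List.enumerate_nil, List.foldl_cons,
          List.foldl_nil]
        rw [calcGStepA_C _ _ _ (Or.inl hm0), calcGStepA_C _ _ _ (Or.inr hm1),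
          calcGStepA_A _ _ _ (Or.inl hm2), calcGStepA_A _ _ _ (Or.inr hm3),
          calcGStepA_B _ _ _ (Or.inl hm4)]
        simp [List.countP_cons, calcGChunks]
        split_ifs <;> simp_all <;> omega
      · -- six or more characters: handle the chunk, then recurse
        simp only [PySem.List.enumerate_cons, List.foldl_cons]
        rw [calcGStepA_C _ _ _ (Or.inl hm0), calcGStepA_C _ _ _ (Or.inr hm1),
          calcGStepA_A _ _ _ (Or.inl hm2), calcGStepA_A _ _ _ (Or.inr hm3),
          calcGStepA_B _ _ _ (Or.inl hm4), calcGStepA_B _ _ _ (Or.inr hm5)]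
        have hstart : (6 * (k : Int) + 1 + 1 + 1 + 1 + 1 + 1) = 6 * ((k + 1 : Nat) : Int) := by
          push_cast; ring
        rw [hstart]
        have hlen : rest.length ≤ n := by
          simp at ht; omega
        rw [ih rest hlen (k + 1)]
        rw [calcGChunks.eq_2]
        simp [List.countP_cons]
        split_ifs <;> simp_all <;> omega

-- B's while loop, started at a multiple of 6, equals the chunked sum of the remaining suffix
lemma calcGWhile_key : ∀ (m : Nat) (t : List Char) (k : Nat) (s : Int),
    (t.drop (6 * k)).length ≤ m →
    calcGWhile t (PySem.List.len t) (6 * (k : Int)) s = s + calcGChunks (t.drop (6 * k)) := by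
  intro m
  induction m with
  | zero =>
      intro t k s h
      have hd : t.drop (6 * k) = [] := by
        cases hh : t.drop (6 * k) <;> simp_all
      have hlen : t.length ≤ 6 * k := by
        have := List.length_drop (l := t) (i := 6 * k)
        omega
      rw [calcGWhile, dif_neg (by simp [PySem.List.len_eq]; exact_mod_cast hlen)]
      simp [hd, calcGChunks]
  | succ m ih =>
      intro t k s h
      by_cases hlt : 6 * k < t.length
      · have hd : t.drop (6 * k) ≠ [] := by
          simp [List.drop_eq_nil_iff]; omega
        rw [calcGWhile, dif_pos (by simp [PySem.List.len_eq]; exact_mod_cast hlt)]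
        have hslice : PySem.List.slice t (some (6 * (k : Int))) (some (6 * (k : Int) + 6))
            = (t.drop (6 * k)).take 6 := by
          have : (6 * (k : Int)) = ((6 * k : Nat) : Int) := by push_cast; ring
          rw [this]
          have h6 : ((6 * k : Nat) : Int) + 6 = ((6 * k : Nat) : Int) + ((6 : Nat) : Int) := by
            norm_num
          rw [h6, PySem.List.slice_natCast_add]
        have hnext : (6 * (k : Int)) + 6 = 6 * ((k + 1 : Nat) : Int) := by push_cast; ring
        have hdroplen : (t.drop (6 * (k + 1))).length ≤ m := by
          have h1 := List.length_drop (l := t) (i := 6 * k)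
          have h2 := List.length_drop (l := t) (i := 6 * (k + 1))
          omega
        rw [hslice, hnext, ih t (k + 1) _ hdroplen]
        rcases hh : t.drop (6 * k) with _ | ⟨a, ts⟩
        · exact absurd hh hd
        · rw [calcGChunks.eq_2]
          have hdd : t.drop (6 * (k + 1)) = (a :: ts).drop 6 := by
            rw [← hh, List.drop_drop]
            ring_nf
          rw [hdd]
          ring
      · have hd : t.drop (6 * k) = [] := by
          simp [List.drop_eq_nil_iff]; omega
        have hlen2 : t.length ≤ 6 * k := by omega
        rw [calcGWhile, dif_neg (by simp [PySem.List.len_eq]; exact_mod_cast hlen2)]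
        simp [hd, calcGChunks]

-- ===== VERDICT (by name: the statement is the Claim_ definition above) =====
theorem calc_g_spec : Claim_equal_calc_g := by
  intro answer _
  unfold Spec_calc_g calc_g calc_g_alt
  have hA := calcG_key answer.toList.length answer.toList le_rfl 0 0
  have hB := calcGWhile_key answer.toList.length answer.toList 0 0 (by simp)
  simp only [Nat.cast_zero, mul_zero, List.drop_zero, zero_add, PySem.List.len_eq] at hA hB
  simp only [PySem.List.len_eq]
  rw [hB]
  exact hA
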